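-- pv_equiv track=rewrite | github.com/J0lan/CreneauMeuhFolle | CreneauxMeuhFolle/benevoles.py | chaine_creneaux
-- ===== SOURCE A (Python) =====
-- HORAIRE = ["09H-10H", "10H-11H", "11H-12H", "12H-13H", "13H-14H", "14H-15H", "15H-16H", "16H-17H",
--            "17H-18H", "18H-19H", "19H-20H", "20H-21H", "21H-22H", "22H-23H", "23H-00H", "00H-01H", "01H-02H", "02H-03H",
--            "03H-04H", "04H-05H", "05H-06H", "06H-07H", "07H-08H", "08H-09H"]
--
-- def get_critere(creneau):
--     return HORAIRE.index(creneau.split(" : ")[0])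
--
-- def chaine_creneaux(creneaux_benevole):
--     """A partir d'une liste de creneaux on crée
--         une chaine de caratère avec saut de ligne
--     """
--     creneaux_benevole = sorted(creneaux_benevole, key=get_critere)
--     creneaux = ''
--     for k in range(len(creneaux_benevole)-1):
--         creneaux += \
--         creneaux_benevole[k] + "\n"
--     if len(creneaux_benevole) > 0:
--         creneaux += \
--         creneaux_benevole[-1]
--     return creneaux
-- ===== SOURCE B (Python) =====
-- HORAIRE = ["09H-10H", "10H-11H", "11H-12H", "12H-13H", "13H-14H", "14H-15H", "15H-16H", "16H-17H",
--            "17H-18H", "18H-19H", "19H-20H", "20H-21H", "21H-22H", "22H-23H", "23H-00H", "00H-01H", "01H-02H", "02H-03H",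
--            "03H-04H", "04H-05H", "05H-06H", "06H-07H", "07H-08H", "08H-09H"]
--
-- def chaine_creneaux(creneaux_benevole):
--     """Bucket the creneaux on the fixed 24-slot table, then emit in slot order."""
--     buckets = [[] for _ in HORAIRE]
--     for creneau in creneaux_benevole:
--         buckets[HORAIRE.index(creneau.split(" : ")[0])].append(creneau)
--     result = []
--     for bucket in buckets:
--         result.extend(bucket)
--     return "\n".join(result)
-- ===== Notes on version B (the rewrite author's own statement) =====
-- stated objective: alternative
-- what changed: Replaces the key-based comparison sort plus index-loop string building with a single-pass bucket distribution over the fixed 24-slot HORAIRE table followed by concatenating the buckets and one '\n'.join.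
import Mathlib
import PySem

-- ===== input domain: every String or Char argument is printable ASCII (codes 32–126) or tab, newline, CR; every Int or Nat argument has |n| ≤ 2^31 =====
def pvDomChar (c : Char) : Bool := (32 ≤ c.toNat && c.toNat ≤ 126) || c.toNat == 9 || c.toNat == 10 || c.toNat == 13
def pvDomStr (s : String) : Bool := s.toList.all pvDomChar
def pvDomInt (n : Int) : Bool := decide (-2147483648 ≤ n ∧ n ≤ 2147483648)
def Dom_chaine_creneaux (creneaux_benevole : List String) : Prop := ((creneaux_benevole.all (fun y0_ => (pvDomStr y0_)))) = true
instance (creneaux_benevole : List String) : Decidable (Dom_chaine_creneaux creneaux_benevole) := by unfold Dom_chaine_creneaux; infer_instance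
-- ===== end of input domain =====

-- B replaces A's key-based comparison sort + index loop with a one-pass bucket
-- distribution over the fixed 24-slot HORAIRE table followed by one join (objective: alternative).

def HORAIRE : List String := ["09H-10H", "10H-11H", "11H-12H", "12H-13H", "13H-14H", "14H-15H", "15H-16H", "16H-17H",
  "17H-18H", "18H-19H", "19H-20H", "20H-21H", "21H-22H", "22H-23H", "23H-00H", "00H-01H", "01H-02H", "02H-03H",
  "03H-04H", "04H-05H", "05H-06H", "06H-07H", "07H-08H", "08H-09H"]

-- HORAIRE.index(creneau.split(" : ")[0]); the '.getD 0' arms are only reached where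
-- Python raises (excluded by Pre_): split? is some (sep ≠ ""), split is nonempty, index is some.
def get_critere (creneau : String) : Nat :=
  (PySem.List.index? HORAIRE (((PySem.Str.split? creneau " : ").getD []).headD "")).getD 0

-- ===== PORT A =====
def chaine_creneaux (creneaux_benevole : List String) : String :=
  let cs := PySem.List.sorted creneaux_benevole get_critere
  let creneaux := (PySem.List.pyRange 0 (PySem.List.len cs - 1)).foldl
      (fun acc k => acc ++ PySem.List.pyGetD cs k "" ++ "\n") ""
  if 0 < cs.length then creneaux ++ PySem.List.pyGetD cs (-1) "" else creneaux

-- ===== PORT B =====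
def chaine_creneaux_alt (creneaux_benevole : List String) : String :=
  let buckets := creneaux_benevole.foldl
      (fun bs c => bs.set (get_critere c) (bs.getD (get_critere c) [] ++ [c]))
      (List.replicate 24 ([] : List String))
  let result := buckets.foldl (fun acc b => acc ++ b) []
  PySem.Str.join "\n" result

-- ===== PRECONDITION & SPEC =====
-- Pre_ excludes exactly the inputs where a creneau's start-slot is not in HORAIRE:
-- there both A and B raise ValueError (HORAIRE.index).
def Pre_chaine_creneaux (creneaux_benevole : List String) : Prop :=
  ∀ c ∈ creneaux_benevole, (((PySem.Str.split? c " : ").getD []).headD "") ∈ HORAIRE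
instance (creneaux_benevole : List String) : Decidable (Pre_chaine_creneaux creneaux_benevole) := by
  unfold Pre_chaine_creneaux; infer_instance

def pvWitness_chaine_creneaux : List String := ["10H-11H : caisse", "09H-10H : bar", "10H-11H"]

def Spec_chaine_creneaux (creneaux_benevole : List String) (out : String) : Prop := out = chaine_creneaux_alt creneaux_benevole
instance (creneaux_benevole : List String) (out : String) : Decidable (Spec_chaine_creneaux creneaux_benevole out) := by unfold Spec_chaine_creneaux; infer_instance

-- ===== CLAIM (what is proved, stated in full; the proofs are below) =====
def Claim_equal_chaine_creneaux : Prop := ∀ (creneaux_benevole : List String), Dom_chaine_creneaux creneaux_benevole → Pre_chaine_creneaux creneaux_benevole → Spec_chaine_creneaux creneaux_benevole (chaine_creneaux creneaux_benevole)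

-- ===== LEMMAS AND PROOFS =====

lemma critere_lt_24 {c : String}
    (h : (((PySem.Str.split? c " : ").getD []).headD "") ∈ HORAIRE) : get_critere c < 24 := by
  unfold get_critere
  obtain ⟨k, hk⟩ := Option.isSome_iff_exists.mp ((PySem.List.index?_isSome_iff _ _).mpr h)
  obtain ⟨hlt, -, -⟩ := PySem.List.getElem_of_index?_eq_some hk
  have hk24 : k < 24 := by simpa [HORAIRE] using hlt
  rw [hk]
  simpa using hk24

-- x goes after everything it is not "before", and before everything it is "before"
lemma insertBy_middle {α : Type} (bef : α → α → Bool) (x : α) (P S : List α)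
    (hP : ∀ p ∈ P, bef x p = false) (hS : ∀ s ∈ S, bef x s = true) :
    PySem.List.insertBy bef x (P ++ S) = P ++ x :: S := by
  induction P with
  | nil =>
    cases S with
    | nil => simp [PySem.List.insertBy]
    | cons s t => simp [PySem.List.insertBy, hS s (by simp)]
  | cons p P ih =>
    simp only [List.cons_append, PySem.List.insertBy, hP p (by simp)]
    simp [ih (fun q hq => hP q (by simp [hq]))]

-- the stable sort is the concatenation of the 24 buckets in slot order
lemma sorted_eq_flat (xs : List String) (h : ∀ c ∈ xs, get_critere c < 24) :
    PySem.List.sorted xs get_critere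
      = (List.range 24).flatMap (fun i => xs.filter (fun c => get_critere c == i)) := by
  induction xs using List.reverseRecOn with
  | nil => simp [PySem.List.sorted]
  | append_singleton xs x ih =>
    have hx : get_critere x < 24 := h x (by simp)
    have hxs : ∀ c ∈ xs, get_critere c < 24 := fun c hc => h c (by simp [hc])
    rw [PySem.List.sorted_eq_foldl_insertBy, List.foldl_append, List.foldl_cons, List.foldl_nil,
        ← PySem.List.sorted_eq_foldl_insertBy, ih hxs]
    set k := get_critere x with hkdef
    have h24 : 24 = (k + 1) + (23 - k) := by omega
    have hsplit : List.range 24 = (List.range k ++ [k]) ++ (List.range (23 - k)).map (k + 1 + ·) := by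
      rw [h24, List.range_add, List.range_succ]
    rw [hsplit]
    simp only [List.flatMap_append, List.flatMap_cons, List.flatMap_nil, List.append_nil,
      List.flatMap_map]
    rw [insertBy_middle]
    · have hbk : ∀ m : Nat, (xs ++ [x]).filter (fun c => get_critere c == m)
          = xs.filter (fun c => get_critere c == m) ++ if k = m then [x] else [] := by
        intro m
        by_cases hm : k = m
        · have hxm : get_critere x = m := hkdef.symm.trans hm
          simp [List.filter_append, hxm, hm]
        · have hxm : get_critere x ≠ m := fun hc => hm (hkdef.trans hc)
          simp [List.filter_append, hxm, hm]
      have hA : (List.range k).flatMap (fun i => (xs ++ [x]).filter (fun c => get_critere c == i))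
          = (List.range k).flatMap (fun i => xs.filter (fun c => get_critere c == i)) := by
        refine List.flatMap_congr (fun i hi => ?_)
        have hik : k ≠ i := by have := List.mem_range.mp hi; omega
        simp [hbk, hik]
      have hC : (List.range (23 - k)).flatMap
            (fun j => (xs ++ [x]).filter (fun c => get_critere c == k + 1 + j))
          = (List.range (23 - k)).flatMap (fun j => xs.filter (fun c => get_critere c == k + 1 + j)) := by
        refine List.flatMap_congr (fun j _ => ?_)
        have hik : k ≠ k + 1 + j := by omega
        simp [hbk, hik]
      rw [hA, hC, hbk k, if_pos rfl]
      simp [List.append_assoc]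
    · intro p hp
      simp only [List.mem_append, List.mem_flatMap, List.mem_filter, List.mem_range] at hp
      have hple : get_critere p ≤ k := by
        rcases hp with ⟨i, hi, -, hpi⟩ | ⟨-, hpk⟩
        · have : get_critere p = i := by simpa using hpi
          omega
        · have : get_critere p = k := by simpa using hpk
          omega
      simp only [decide_eq_false_iff_not, not_lt, ← hkdef]
      exact hple
    · intro s hs
      simp only [List.mem_flatMap, List.mem_range] at hs
      obtain ⟨j, hj, hsj⟩ := hs
      have : get_critere s = k + 1 + j := by
        have := (List.mem_filter.mp hsj).2
        simpa using this
      simp only [decide_eq_true_eq, ← hkdef]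
      omega

lemma set_map_range {β : Type} (f : Nat → β) (n k : Nat) (v : β) (hk : k < n) :
    (List.map f (List.range n)).set k v
      = List.map (fun i => if i = k then v else f i) (List.range n) := by
  apply List.ext_getElem
  · simp
  · intro i h1 h2
    simp only [List.length_set, List.length_map, List.length_range] at h1
    by_cases hik : i = k
    · subst hik; simp
    · simp [List.getElem_set, hik]
      intro hc
      exact absurd hc.symm hik

-- B's bucket fold computes, slot by slot, the filter of the input
lemma buckets_eq (xs : List String) (h : ∀ c ∈ xs, get_critere c < 24) :
    xs.foldl (fun bs c => bs.set (get_critere c) (bs.getD (get_critere c) [] ++ [c]))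
        (List.replicate 24 ([] : List String))
      = (List.range 24).map (fun i => xs.filter (fun c => get_critere c == i)) := by
  induction xs using List.reverseRecOn with
  | nil =>
    apply List.ext_getElem <;> simp
  | append_singleton xs x ih =>
    have hx : get_critere x < 24 := h x (by simp)
    have hxs : ∀ c ∈ xs, get_critere c < 24 := fun c hc => h c (by simp [hc])
    rw [List.foldl_append, List.foldl_cons, List.foldl_nil, ih hxs]
    rw [List.getD_eq_getElem?_getD]
    rw [set_map_range _ _ _ _ hx]
    apply List.map_congr_left
    intro i hi
    have hi24 : i < 24 := List.mem_range.mp hi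
    by_cases hik : i = get_critere x
    · simp [hik, List.filter_append, hx]
    · have : ¬ (get_critere x = i) := fun hc => hik hc.symm
      simp [hik, List.filter_append, this]

-- ys[-1] is ys[len(ys)-1]
lemma pyGetD_neg_one {α : Type} (ys : List α) (d : α) (h : ys ≠ []) :
    PySem.List.pyGetD ys (-1) d = PySem.List.pyGetD ys ((ys.length : Int) - 1) d := by
  have hn : 0 < ys.length := List.length_pos_iff.mpr h
  have e1 : PySem.List.pyIdx? ys.length (-1) = some (ys.length - 1) := by
    have h2 : -(ys.length : Int) ≤ -1 := by omega
    simp [PySem.List.pyIdx?, h2]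
  have e2 : PySem.List.pyIdx? ys.length ((ys.length : Int) - 1) = some (ys.length - 1) := by
    have h4 : (ys.length : Int) - 1 < (ys.length : Int) := by omega
    have h5 : ((ys.length : Int) - 1).toNat = ys.length - 1 := by omega
    simp [PySem.List.pyIdx?, h4, h5]
    intro he
    exact absurd he h
  simp [PySem.List.pyGetD, PySem.List.pyGet?, e1, e2]

-- the '+= elem + "\n"' fold over a prefix, closed with the last element, is join("\n", ·)
lemma foldl_append_join (zs : List String) (z : String) : ∀ acc : String,
    zs.foldl (fun acc s => acc ++ s ++ "\n") acc ++ z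
      = acc ++ PySem.Str.join "\n" (zs ++ [z]) := by
  induction zs with
  | nil =>
    intro acc
    apply String.toList_inj.mp
    simp [PySem.Str.toList_join, PySem.Chars.join_singleton]
  | cons w zs ih =>
    intro acc
    rw [List.foldl_cons, ih]
    apply String.toList_inj.mp
    cases zs with
    | nil =>
      simp [PySem.Str.toList_join, PySem.Chars.join_cons_cons, PySem.Chars.join_singleton]
    | cons v t =>
      simp [PySem.Str.toList_join, PySem.Chars.join_cons_cons]

-- A's whole emission phase is join("\n", ys)
lemma emit_eq_join (ys : List String) :
    (if 0 < ys.length then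
        (PySem.List.pyRange 0 (PySem.List.len ys - 1)).foldl
          (fun acc k => acc ++ PySem.List.pyGetD ys k "" ++ "\n") "" ++ PySem.List.pyGetD ys (-1) ""
      else
        (PySem.List.pyRange 0 (PySem.List.len ys - 1)).foldl
          (fun acc k => acc ++ PySem.List.pyGetD ys k "" ++ "\n") "")
      = PySem.Str.join "\n" ys := by
  by_cases hys : ys = []
  · subst hys
    have : PySem.List.pyRange 0 (PySem.List.len ([] : List String) - 1) = [] := by decide
    rw [this]
    apply String.toList_inj.mp
    simp [PySem.Str.toList_join, PySem.Chars.join, List.intercalate]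
  · have hn : 0 < ys.length := List.length_pos_iff.mpr hys
    have hsplit : PySem.List.pyRange 0 (PySem.List.len ys)
        = PySem.List.pyRange 0 (PySem.List.len ys - 1) ++ [(PySem.List.len ys - 1)] := by
      rw [PySem.List.pyRange_one_append 0 (PySem.List.len ys - 1) (PySem.List.len ys)
            (by simp [PySem.List.len]; omega) (by omega)]
      congr 1
      rw [PySem.List.pyRange_one_cons (by omega)]
      have : PySem.List.len ys - 1 + 1 = PySem.List.len ys := by ring
      rw [this]
      simp [PySem.List.pyRange]
    have hfull := PySem.List.map_pyGetD_pyRange_zero ys ""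
    rw [hsplit, List.map_append, List.map_cons, List.map_nil] at hfull
    -- ys = prefix ++ [last]
    have hpref : (PySem.List.pyRange 0 (PySem.List.len ys - 1)).map (fun j => PySem.List.pyGetD ys j "")
        = ys.dropLast := by
      conv_rhs => rw [← hfull]
      rw [List.dropLast_concat]
    have hlast : PySem.List.pyGetD ys (PySem.List.len ys - 1) "" = PySem.List.pyGetD ys ((ys.length : Int) - 1) "" := rfl
    rw [if_pos hn, pyGetD_neg_one ys "" hys]
    have hfold : (PySem.List.pyRange 0 (PySem.List.len ys - 1)).foldl
          (fun acc k => acc ++ PySem.List.pyGetD ys k "" ++ "\n") ""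
        = ys.dropLast.foldl (fun acc s => acc ++ s ++ "\n") "" := by
      rw [← hpref, List.foldl_map]
    rw [hfold, ← hlast, foldl_append_join]
    have : ys.dropLast ++ [PySem.List.pyGetD ys (PySem.List.len ys - 1) ""] = ys := by
      conv_rhs => rw [← hfull]
      rw [hpref]
    rw [this]
    apply String.toList_inj.mp
    simp

-- ===== VERDICT (by name: the statement is the Claim_ definition above) =====
theorem chaine_creneaux_spec : Claim_equal_chaine_creneaux := by
  intro xs _ hpre
  unfold Spec_chaine_creneaux chaine_creneaux chaine_creneaux_alt
  have hlt : ∀ c ∈ xs, get_critere c < 24 := fun c hc => critere_lt_24 (hpre c hc)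
  simp only [buckets_eq xs hlt, PySem.List.foldl_append_eq_flatten, List.nil_append,
    ← List.flatMap_def, ← sorted_eq_flat xs hlt]
  exact emit_eq_join (PySem.List.sorted xs get_critere)
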